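-- pv_equiv track=rewrite | github.com/DNAstorage-iSynBio/Xiao-Pang | Code-Xiaopang/xiaopang.py | encode_homopolymer
-- ===== SOURCE A (Python) =====
-- def encode_homopolymer(code):
--     rec=[]
--     i=0
--     while(i<=len(code)-1):
--         if code[i:i+4]=='4444':
--             rec.append('12344');i=i+4
--
--         elif code[i:i+4]=='3333':
--             rec.append('12343');i=i+4
--
--         elif code[i:i+4]=='2222':
--             rec.append('12342');i=i+4
--
--         elif code[i:i+4]=='1111':
--             rec.append('12341');i=i+4
--
--         else:
--             rec.append(code[i]);i=i+1
--
--     code=''.join(rec)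
--     return code
-- ===== SOURCE B (Python) =====
-- def encode_homopolymer(code):
--     out = []
--     i = 0
--     n = len(code)
--     while i < n:
--         c = code[i]
--         j = i
--         while j < n and code[j] == c:
--             j += 1
--         run = j - i
--         if c in '1234':
--             out.append(('1234' + c) * (run // 4))
--             out.append(c * (run % 4))
--         else:
--             out.append(c * run)
--         i = j
--     return ''.join(out)
-- ===== Notes on version B (the rewrite author's own statement) =====
-- stated objective: faster
-- what changed: B decomposes the input into maximal runs of equal characters and emits floor(run/4) markers plus run mod 4 leftover characters per run by div/mod arithmetic, instead of A's index-stepping scan that builds and compares a 4-char slice against four literal patterns at every position.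
import Mathlib
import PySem

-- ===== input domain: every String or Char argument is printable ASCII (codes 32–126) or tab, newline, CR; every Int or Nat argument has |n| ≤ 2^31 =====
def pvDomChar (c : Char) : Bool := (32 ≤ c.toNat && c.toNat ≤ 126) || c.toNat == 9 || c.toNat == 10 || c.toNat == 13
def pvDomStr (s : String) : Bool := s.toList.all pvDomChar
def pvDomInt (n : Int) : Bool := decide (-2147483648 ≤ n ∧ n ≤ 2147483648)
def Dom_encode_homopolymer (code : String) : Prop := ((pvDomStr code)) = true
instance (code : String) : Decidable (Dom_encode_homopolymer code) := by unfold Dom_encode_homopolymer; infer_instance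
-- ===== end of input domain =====

-- B replaces A's per-position slice building/comparison by a maximal-run decomposition with div/mod arithmetic (objective: faster by a constant factor, measured).

-- ===== PORT A =====
-- A's while loop over index i, checking the slice code[i:i+4] against the four
-- literal patterns and stepping by 4 or 1; ported as recursion on the remaining
-- suffix of characters.  code[i:i+4] at a nonnegative in-range index is exactly
-- `take 4` of the remaining suffix and code[i] its head (exact here: i is always
-- in range inside the loop), and rec.append/''.join is list concatenation.
def encA : List Char → List Char
  | [] => []
  | c :: rest =>
    if (c :: rest).take 4 = ['4','4','4','4'] then
      '1' :: '2' :: '3' :: '4' :: '4' :: encA ((c :: rest).drop 4)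
    else if (c :: rest).take 4 = ['3','3','3','3'] then
      '1' :: '2' :: '3' :: '4' :: '3' :: encA ((c :: rest).drop 4)
    else if (c :: rest).take 4 = ['2','2','2','2'] then
      '1' :: '2' :: '3' :: '4' :: '2' :: encA ((c :: rest).drop 4)
    else if (c :: rest).take 4 = ['1','1','1','1'] then
      '1' :: '2' :: '3' :: '4' :: '1' :: encA ((c :: rest).drop 4)
    else
      c :: encA rest
termination_by cs => cs.length
decreasing_by all_goals simp; try omega

def encode_homopolymer (code : String) : String := String.mk (encA code.toList)

-- ===== PORT B =====
-- Source B: the outer loop takes the maximal run of the current character (the inner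
-- while is takeWhile/dropWhile), then emits ('1234'+c)*(run//4) and c*(run%4)
-- for c in '1234', or c*run otherwise.
def markerB (c : Char) : List Char := ['1', '2', '3', '4', c]

def encB : List Char → List Char
  | [] => []
  | c :: rest =>
    let run := 1 + (rest.takeWhile (· == c)).length
    let tail := rest.dropWhile (· == c)
    (if c ∈ ['1','2','3','4'] then
        (List.replicate (run / 4) (markerB c)).flatten ++ List.replicate (run % 4) c
      else
        List.replicate run c) ++ encB tail
termination_by cs => cs.length
decreasing_by
  simp only [List.length_cons]
  have := List.length_dropWhile_le (p := (· == c)) (l := rest)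
  omega

def encode_homopolymer_alt (code : String) : String := String.mk (encB code.toList)

-- ===== PRECONDITION & SPEC =====
def Spec_encode_homopolymer (code : String) (out : String) : Prop := out = encode_homopolymer_alt code
instance (code : String) (out : String) : Decidable (Spec_encode_homopolymer code out) := by unfold Spec_encode_homopolymer; infer_instance

-- ===== CLAIM (what is proved, stated in full; the proofs are below) =====
def Claim_equal_encode_homopolymer : Prop := ∀ (code : String), Dom_encode_homopolymer code → Spec_encode_homopolymer code (encode_homopolymer code)

-- ===== LEMMAS AND PROOFS =====

-- a 4-pattern can only match at the start of a run of length ≥ 4 of the same character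
theorem take4_pattern {k : ℕ} {c d : Char} {rest : List Char}
    (hk : 1 ≤ k) (hrest : rest.head? ≠ some c)
    (h : (List.replicate k c ++ rest).take 4 = [d, d, d, d]) : c = d ∧ 4 ≤ k := by
  have hc : c = d := by
    have hh := congrArg List.head? h
    match k, hk with
    | (m + 1), _ =>
      simp [List.replicate_succ] at hh
      exact hh
  refine ⟨hc, ?_⟩
  rcases Nat.lt_or_ge k 4 with hlt | h4
  swap
  · exact h4
  exfalso
  have e1 : (List.replicate k c ++ rest)[k]? = rest[0]? := by
    rw [List.getElem?_append_right (by simp)]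
    simp
  have e2 : ((List.replicate k c ++ rest).take 4)[k]? = (List.replicate k c ++ rest)[k]? := by
    rw [List.getElem?_take]
    rw [if_pos (by omega)]
  have e3 : (([d, d, d, d] : List Char))[k]? = some d := by
    interval_cases k <;> simp
  rw [h, e3, e1] at e2
  exact hrest (by rw [List.head?_eq_getElem?, ← e2, hc])

-- the run lemma: on a block of k copies of c followed by a suffix not starting
-- with c, A emits exactly B's per-run output and continues on the suffix.
theorem encA_run (c : Char) : ∀ (k : ℕ) (rest : List Char),
    rest.head? ≠ some c →
    encA (List.replicate k c ++ rest) =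
      (if c ∈ ['1','2','3','4'] then
          (List.replicate (k / 4) (markerB c)).flatten ++ List.replicate (k % 4) c
        else
          List.replicate k c) ++ encA rest := by
  intro k
  induction k using Nat.strong_induction_on with
  | _ k ih =>
    intro rest hrest
    match k with
    | 0 => simp
    | (m + 1) =>
      have hcons : List.replicate (m + 1) c ++ rest = c :: (List.replicate m c ++ rest) := by
        rw [List.replicate_succ]; rfl
      by_cases hbig : 4 ≤ m + 1 ∧ c ∈ (['1','2','3','4'] : List Char)
      · obtain ⟨h4, hc⟩ := hbig
        have htake : (List.replicate (m + 1) c ++ rest).take 4 = [c, c, c, c] := by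
          rw [List.take_append_of_le_length (by simp; omega), List.take_replicate]
          rw [min_eq_left h4]
          rfl
        have hdrop : (List.replicate (m + 1) c ++ rest).drop 4 =
            List.replicate (m + 1 - 4) c ++ rest := by
          rw [List.drop_append_of_le_length (by simp; omega), List.drop_replicate]
        have hrec := ih (m + 1 - 4) (by omega) rest hrest
        have hdiv : (m + 1) / 4 = (m + 1 - 4) / 4 + 1 := by omega
        have hmod : (m + 1) % 4 = (m + 1 - 4) % 4 := by omega
        rw [if_pos hc] at hrec ⊢
        fin_cases hc <;>
          · rw [hcons, encA, ← hcons]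
            simp only [htake, hdrop]
            norm_num
            rw [hrec, hdiv, hmod]
            simp [markerB, List.replicate_succ]
      · -- run shorter than 4, or not a 1-4 digit: the single-character branch fires
        have hnm : ∀ d : Char, d ∈ (['1','2','3','4'] : List Char) →
            ¬ (List.replicate (m + 1) c ++ rest).take 4 = [d, d, d, d] := by
          intro d hd h
          obtain ⟨hcd, h4⟩ := take4_pattern (by omega) hrest h
          exact hbig ⟨h4, by rw [hcd]; exact hd⟩
        have hrec := ih m (by omega) rest hrest
        rw [hcons, encA, ← hcons]
        rw [if_neg (hnm '4' (by simp)), if_neg (hnm '3' (by simp)),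
          if_neg (hnm '2' (by simp)), if_neg (hnm '1' (by simp)), hrec]
        by_cases hc : c ∈ (['1','2','3','4'] : List Char)
        · have hm3 : m + 1 ≤ 3 := by
            by_contra h'
            exact hbig ⟨by omega, hc⟩
          rw [if_pos hc, if_pos hc]
          have e1 : (m + 1) / 4 = 0 := by omega
          have e2 : (m + 1) % 4 = m + 1 := by omega
          have e3 : m / 4 = 0 := by omega
          have e4 : m % 4 = m := by omega
          rw [e1, e2, e3, e4]
          simp [List.replicate_succ]
        · rw [if_neg hc, if_neg hc]
          simp [List.replicate_succ]

theorem head_dropWhile_ne (c : Char) (l : List Char) :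
    (l.dropWhile (· == c)).head? ≠ some c := by
  induction l with
  | nil => simp
  | cons a l ih =>
    by_cases h : a = c
    · simpa [List.dropWhile_cons, h] using ih
    · simp [h]

theorem encA_eq_encB : ∀ (n : ℕ) (cs : List Char), cs.length ≤ n → encA cs = encB cs := by
  intro n
  induction n with
  | zero =>
    intro cs h
    match cs, h with
    | [], _ => rw [encA, encB]
  | succ n ih =>
    intro cs h
    match cs with
    | [] => rw [encA, encB]
    | c :: rest =>
      have ht : rest.takeWhile (· == c) =
          List.replicate (rest.takeWhile (· == c)).length c := by
        apply List.eq_replicate_of_mem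
        intro b hb
        simpa using List.mem_takeWhile_imp hb
      have hsplit : c :: rest =
          List.replicate ((rest.takeWhile (· == c)).length + 1) c ++ rest.dropWhile (· == c) := by
        rw [List.replicate_succ, List.cons_append, ← ht, List.takeWhile_append_dropWhile]
      have hlen : (rest.dropWhile (· == c)).length ≤ n := by
        have := List.length_dropWhile_le (p := (· == c)) (l := rest)
        simp at h
        omega
      rw [hsplit, encA_run c _ _ (head_dropWhile_ne c rest), ih _ hlen, ← hsplit, encB]
      rw [Nat.add_comm 1 (rest.takeWhile (· == c)).length]

-- ===== VERDICT (by name: the statement is the Claim_ definition above) =====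
theorem encode_homopolymer_spec : Claim_equal_encode_homopolymer := by
  intro code _
  unfold Spec_encode_homopolymer encode_homopolymer encode_homopolymer_alt
  rw [encA_eq_encB code.toList.length code.toList le_rfl]
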